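-- pv_equiv track=rewrite | github.com/wfordh/mlb_showdown | ottoneu_tools/active_auctions.py | get_position_group
-- ===== SOURCE A (Python) =====
-- def get_position_group(positions):
--     # turn this into a dict?
--     is_hitter = False
--     is_pitcher = False
--     if "/" in positions:
--         if all(["P" in pos for pos in positions.split("/")]):
--             is_pitcher = True
--         elif any(["P" in pos for pos in positions.split("/")]):
--             is_pitcher = True
--             is_hitter = True
--         else:
--             is_hitter = True
--     else:
--         if "P" in positions:
--             is_pitcher = True
--         else:
--             is_hitter = True
--     return is_hitter, is_pitcher
-- ===== SOURCE B (Python) =====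
-- def get_position_group(positions):
--     # Single character-level scan with flag accumulators; no split, no intermediate lists.
--     any_p = False   # some '/'-segment seen so far contains 'P'
--     all_p = True    # every closed '/'-segment so far contains 'P'
--     cur = False     # current (open) segment contains 'P'
--     for ch in positions:
--         if ch == "/":
--             any_p = any_p or cur
--             all_p = all_p and cur
--             cur = False
--         else:
--             cur = cur or ch == "P"
--     return (not (all_p and cur), any_p or cur)
-- ===== Notes on version B (the rewrite author's own statement) =====
-- stated objective: alternative
-- what changed: Replaced the slash-split plus the all/any list comprehensions and the four-way branch with a single character-level scan carrying three boolean flags (some segment has P, every segment has P, current segment has P), allocating no intermediate lists.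
import Mathlib
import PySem

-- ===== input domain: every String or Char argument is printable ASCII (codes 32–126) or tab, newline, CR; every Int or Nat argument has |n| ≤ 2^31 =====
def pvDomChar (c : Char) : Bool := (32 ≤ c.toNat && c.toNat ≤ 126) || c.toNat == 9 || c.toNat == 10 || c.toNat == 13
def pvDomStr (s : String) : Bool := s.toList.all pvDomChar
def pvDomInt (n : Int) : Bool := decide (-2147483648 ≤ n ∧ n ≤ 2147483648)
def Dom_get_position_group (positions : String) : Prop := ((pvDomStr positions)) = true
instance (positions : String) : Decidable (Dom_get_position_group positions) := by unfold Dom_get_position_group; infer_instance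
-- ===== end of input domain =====

-- B replaces A's split/all/any branching with a single character-level scan
-- carrying three flags; objective: alternative (no intermediate lists).

-- ===== PORT A =====
-- positions.split("/") with the literal nonempty separator "/" is exactly
-- PySem.Chars.splitOn on the code points; "X" in s is PySem.Str.isIn.
def get_position_group (positions : String) : Bool × Bool :=
  if PySem.Str.isIn "/" positions then
    if ((PySem.Chars.splitOn positions.toList ['/']).map
        (fun pos => PySem.Chars.isIn ['P'] pos)).all (fun b => b) then
      (false, true)
    else if ((PySem.Chars.splitOn positions.toList ['/']).map
        (fun pos => PySem.Chars.isIn ['P'] pos)).any (fun b => b) then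
      (true, true)
    else
      (true, false)
  else
    if PySem.Str.isIn "P" positions then
      (false, true)
    else
      (true, false)

-- ===== PORT B =====
-- state = (any_p, all_p, cur): some closed segment has 'P', every closed segment has 'P',
-- the current open segment has 'P'.
def pvScanStep (st : Bool × Bool × Bool) (ch : Char) : Bool × Bool × Bool :=
  if ch = '/' then (st.1 || st.2.2, st.2.1 && st.2.2, false)
  else (st.1, st.2.1, st.2.2 || (ch = 'P'))

def get_position_group_alt (positions : String) : Bool × Bool :=
  let st := positions.toList.foldl pvScanStep (false, true, false)
  (!(st.2.1 && st.2.2), st.1 || st.2.2)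

-- ===== PRECONDITION & SPEC =====
def Spec_get_position_group (positions : String) (out : Bool × Bool) : Prop := out = get_position_group_alt positions
instance (positions : String) (out : Bool × Bool) : Decidable (Spec_get_position_group positions out) := by unfold Spec_get_position_group; infer_instance

-- ===== CLAIM (what is proved, stated in full; the proofs are below) =====
def Claim_equal_get_position_group : Prop := ∀ (positions : String), Dom_get_position_group positions → Spec_get_position_group positions (get_position_group positions)

-- ===== LEMMAS AND PROOFS =====

theorem isIn_singleton (a : Char) (l : List Char) :
    PySem.Chars.isIn [a] l = decide (a ∈ l) := by
  by_cases h : a ∈ l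
  · simp [h, (PySem.Chars.isIn_iff_infix [a] l).mpr ((List.singleton_infix_iff a l).mpr h)]
  · have hf : PySem.Chars.isIn [a] l = false := by
      rw [Bool.eq_false_iff]
      intro hc
      exact h ((List.singleton_infix_iff a l).mp ((PySem.Chars.isIn_iff_infix [a] l).mp hc))
    simp [h, hf]

theorem splitOn_go_ne_nil (sep : List Char) (fuel : Nat) (l cur : List Char)
    (acc : List (List Char)) : PySem.Chars.splitOn.go sep fuel l cur acc ≠ [] := by
  induction fuel generalizing l cur acc with
  | zero => simp [PySem.Chars.splitOn.go]
  | succ n ih =>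
    cases l with
    | nil => simp [PySem.Chars.splitOn.go]
    | cons c rest =>
      rw [PySem.Chars.splitOn.go]
      split
      · exact ih _ _ _
      · exact ih _ _ _

theorem splitOn_ne_nil (s sep : List Char) : PySem.Chars.splitOn s sep ≠ [] :=
  splitOn_go_ne_nil sep _ s [] []

theorem splitOn_go_acc (sep : List Char) (fuel : Nat) (l cur : List Char)
    (acc : List (List Char)) :
    PySem.Chars.splitOn.go sep fuel l cur acc
      = acc.reverse ++ PySem.Chars.splitOn.go sep fuel l cur [] := by
  induction fuel generalizing l cur acc with
  | zero => simp [PySem.Chars.splitOn.go]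
  | succ n ih =>
    cases l with
    | nil => simp [PySem.Chars.splitOn.go]
    | cons c rest =>
      rw [PySem.Chars.splitOn.go, PySem.Chars.splitOn.go]
      split
      · rw [ih _ _ (cur.reverse :: acc), ih _ _ [cur.reverse]]
        simp
      · exact ih _ _ _

theorem splitOn_go_not_infix (sep : List Char) (fuel : Nat) (l cur : List Char)
    (acc : List (List Char)) (h : ¬ sep <:+: l) :
    PySem.Chars.splitOn.go sep fuel l cur acc = acc.reverse ++ [cur.reverse ++ l] := by
  induction fuel generalizing l cur acc with
  | zero => simp [PySem.Chars.splitOn.go]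
  | succ n ih =>
    cases l with
    | nil => simp [PySem.Chars.splitOn.go]
    | cons c rest =>
      rw [PySem.Chars.splitOn.go]
      have hp : sep.isPrefixOf (c :: rest) = false := by
        by_contra hc
        exact h ((List.isPrefixOf_iff_prefix.mp (by simpa using hc)).isInfix)
      simp only [hp]
      rw [ih rest (c :: cur) acc (fun hi => h (hi.trans (List.suffix_cons c rest).isInfix))]
      simp

theorem splitOn_not_infix (s sep : List Char) (h : ¬ sep <:+: s) :
    PySem.Chars.splitOn s sep = [s] := by
  unfold PySem.Chars.splitOn
  rw [splitOn_go_not_infix sep _ s [] [] h]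
  simp

theorem all_imp_any {α : Type} (l : List α) (p : α → Bool) (hne : l ≠ [])
    (h : l.all p = true) : l.any p = true := by
  cases l with
  | nil => exact absurd rfl hne
  | cons x t => simp_all

-- the scan invariant: running the char scan over l, starting from flags (anyp, allp)
-- and an open segment cur (reversed), computes any/all of 'P'-membership over the
-- segments that splitOn.go would produce from the same state.
theorem scan_go (fuel : Nat) (l cur : List Char) (anyp allp : Bool)
    (hf : l.length < fuel) :
    ((l.foldl pvScanStep (anyp, allp, decide ('P' ∈ cur))).1
        || (l.foldl pvScanStep (anyp, allp, decide ('P' ∈ cur))).2.2,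
     (l.foldl pvScanStep (anyp, allp, decide ('P' ∈ cur))).2.1
        && (l.foldl pvScanStep (anyp, allp, decide ('P' ∈ cur))).2.2)
      = (anyp || (PySem.Chars.splitOn.go ['/'] fuel l cur []).any
            (fun p => PySem.Chars.isIn ['P'] p),
         allp && (PySem.Chars.splitOn.go ['/'] fuel l cur []).all
            (fun p => PySem.Chars.isIn ['P'] p)) := by
  induction l generalizing fuel cur anyp allp with
  | nil =>
    cases fuel with
    | zero => omega
    | succ n =>
      simp [PySem.Chars.splitOn.go, isIn_singleton]
  | cons c rest ih =>
    cases fuel with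
    | zero => omega
    | succ n =>
      rw [PySem.Chars.splitOn.go]
      by_cases hc : c = '/'
      · subst hc
        have hp : List.isPrefixOf ['/'] ('/' :: rest) = true := by
          simp [List.isPrefixOf]
        rw [if_pos hp]
        rw [splitOn_go_acc ['/'] n _ [] [List.reverse cur]]
        have hstep : pvScanStep (anyp, allp, decide ('P' ∈ cur)) '/'
            = (anyp || decide ('P' ∈ cur), allp && decide ('P' ∈ cur),
               decide ('P' ∈ ([] : List Char))) := by
          simp [pvScanStep]
        rw [List.foldl_cons, hstep,
          ih n [] (anyp || decide ('P' ∈ cur)) (allp && decide ('P' ∈ cur))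
            (by simpa using hf)]
        simp [isIn_singleton, Bool.or_assoc, Bool.and_assoc]
      · have hp : ¬ List.isPrefixOf ['/'] (c :: rest) = true := by
          simp [List.isPrefixOf]
          exact fun h => hc h.symm
        rw [if_neg hp]
        have hstep : pvScanStep (anyp, allp, decide ('P' ∈ cur)) c
            = (anyp, allp, decide ('P' ∈ (c :: cur))) := by
          simp [pvScanStep, hc]
          by_cases hP : c = 'P' <;> by_cases hm : 'P' ∈ cur <;>
            simp [hP, hm, eq_comm]
        rw [List.foldl_cons, hstep, ih n (c :: cur) anyp allp (by simpa using hf)]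

theorem alt_eq (positions : String) :
    get_position_group_alt positions
      = (!(PySem.Chars.splitOn positions.toList ['/']).all
            (fun p => PySem.Chars.isIn ['P'] p),
         (PySem.Chars.splitOn positions.toList ['/']).any
            (fun p => PySem.Chars.isIn ['P'] p)) := by
  unfold get_position_group_alt PySem.Chars.splitOn
  have h := scan_go (positions.toList.length + 1) positions.toList [] false true
    (by omega)
  simp only [List.mem_nil_iff, decide_false] at h
  have h1 := congrArg Prod.fst h
  have h2 := congrArg Prod.snd h
  simp only at h1 h2
  simp [h1, h2]

-- ===== VERDICT (by name: the statement is the Claim_ definition above) =====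
theorem get_position_group_spec : Claim_equal_get_position_group := by
  intro positions _
  unfold Spec_get_position_group
  rw [alt_eq]
  unfold get_position_group
  by_cases h : PySem.Str.isIn "/" positions = true
  · simp only [h, if_true, List.all_map, List.any_map, Function.comp_def]
    set parts := PySem.Chars.splitOn positions.toList ['/'] with hparts
    have hne : parts ≠ [] := splitOn_ne_nil _ _
    split_ifs with h1 h2
    · simp [h1, all_imp_any parts _ hne h1]
    · simp [h1, h2]
    · simp [h1, h2]
  · have hinf : ¬ ['/'] <:+: positions.toList := by
      intro hi
      exact h ((PySem.Chars.isIn_iff_infix ['/'] positions.toList).mpr hi)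
    rw [if_neg h, splitOn_not_infix _ _ hinf]
    by_cases hP : PySem.Str.isIn "P" positions = true
    · have : PySem.Chars.isIn ['P'] positions.toList = true := hP
      simp [this]
    · have : PySem.Chars.isIn ['P'] positions.toList = false := Bool.eq_false_iff.mpr hP
      simp [this]
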